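-- pv_equiv track=rewrite | github.com/adorislabs/sahayak | src/conversation/interfaces/web.py | _get_thinking_hint
-- ===== SOURCE A (Python) =====
-- def _get_thinking_hint(message: str) -> str:
--     """Return a short (3-5 word) hint about what the bot is processing."""
--     lower = message.lower()
--     if any(w in lower for w in ["lakh", "hazar", "income", "salary", "earning", "rupay", "paisa", "kamata", "kamate"]):
--         return "Parsing income details…"
--     if any(w in lower for w in [" sc", " st", " obc", "dalit", "adivasi", "caste", "jati", "category", "varg"]):
--         return "Noting community category…"
--     if any(w in lower for w in ["bpl", "ration", "aadhaar", "aadhar", "document", "card"]):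
--         return "Checking document details…"
--     if any(w in lower for w in ["state", "district", "village", "gaon", "city", "shahar", "pradesh", "from"]):
--         return "Identifying your location…"
--     if any(w in lower for w in ["age", " saal", "years old", "born", "umar"]):
--         return "Noting your age…"
--     if any(w in lower for w in ["farmer", "kisaan", "kisan", "agriculture", "khet", "land", "zameen"]):
--         return "Noting occupation…"
--     if any(w in lower for w in ["family", "parivar", "member", "wife", "husband", "children", "bache"]):
--         return "Understanding family details…"
--     if any(w in lower for w in ["check", "eligib", "patrata", "yojana", "scheme", "apply"]):
--         return "Running eligibility check…"
--     return "Understanding your message…"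
-- ===== SOURCE B (Python) =====
-- _CATEGORY_KEYWORDS = [
--     ["lakh", "hazar", "income", "salary", "earning", "rupay", "paisa", "kamata", "kamate"],
--     [" sc", " st", " obc", "dalit", "adivasi", "caste", "jati", "category", "varg"],
--     ["bpl", "ration", "aadhaar", "aadhar", "document", "card"],
--     ["state", "district", "village", "gaon", "city", "shahar", "pradesh", "from"],
--     ["age", " saal", "years old", "born", "umar"],
--     ["farmer", "kisaan", "kisan", "agriculture", "khet", "land", "zameen"],
--     ["family", "parivar", "member", "wife", "husband", "children", "bache"],
--     ["check", "eligib", "patrata", "yojana", "scheme", "apply"],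
-- ]
--
-- _TEXTS = [
--     "Parsing income details…",
--     "Noting community category…",
--     "Checking document details…",
--     "Identifying your location…",
--     "Noting your age…",
--     "Noting occupation…",
--     "Understanding family details…",
--     "Running eligibility check…",
--     "Understanding your message…",
-- ]
--
-- _FLAT = [(kw, cat) for cat, kws in enumerate(_CATEGORY_KEYWORDS) for kw in kws]
--
--
-- def _get_thinking_hint(message: str) -> str:
--     """Return a short (3-5 word) hint about what the bot is processing."""
--     # Naive multi-pattern matcher: slide over the lowercased message position by
--     # position, test each keyword as a prefix there, and keep the minimum
--     # (highest-priority) category index seen; no substring tests, no early return.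
--     lower = message.lower()
--     best = len(_CATEGORY_KEYWORDS)  # 8 = no keyword occurs anywhere
--     for i in range(len(lower)):
--         for kw, cat in _FLAT:
--             if cat < best and lower.startswith(kw, i):
--                 best = cat
--     return _TEXTS[best]
-- ===== Notes on version B (the rewrite author's own statement) =====
-- stated objective: alternative
-- what changed: The per-category if-chain of any-substring tests with early return is replaced by a naive multi-pattern matcher: one slide over the message positions, testing each keyword as a prefix at each position and accumulating the minimum category index, which is then mapped to its hint text.
import Mathlib
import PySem

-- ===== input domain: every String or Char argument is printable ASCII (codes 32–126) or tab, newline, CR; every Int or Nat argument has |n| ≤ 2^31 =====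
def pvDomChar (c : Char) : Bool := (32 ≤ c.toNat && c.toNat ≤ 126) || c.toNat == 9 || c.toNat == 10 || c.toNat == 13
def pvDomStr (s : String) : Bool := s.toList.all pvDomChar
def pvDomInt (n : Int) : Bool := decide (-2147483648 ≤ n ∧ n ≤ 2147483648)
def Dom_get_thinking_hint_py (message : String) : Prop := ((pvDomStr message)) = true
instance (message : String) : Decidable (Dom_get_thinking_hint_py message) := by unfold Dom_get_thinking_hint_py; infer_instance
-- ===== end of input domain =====

-- B replaces A's per-category any-substring if-chain by a naive multi-pattern scan over
-- message positions accumulating the minimum matching category index (alternative).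


-- ===== PORT A =====
def get_thinking_hint_py (message : String) : String :=
  let lower := PySem.Str.lower message
  if ["lakh", "hazar", "income", "salary", "earning", "rupay", "paisa", "kamata", "kamate"].any (fun w => PySem.Str.isIn w lower) then "Parsing income details…"
  else if [" sc", " st", " obc", "dalit", "adivasi", "caste", "jati", "category", "varg"].any (fun w => PySem.Str.isIn w lower) then "Noting community category…"
  else if ["bpl", "ration", "aadhaar", "aadhar", "document", "card"].any (fun w => PySem.Str.isIn w lower) then "Checking document details…"
  else if ["state", "district", "village", "gaon", "city", "shahar", "pradesh", "from"].any (fun w => PySem.Str.isIn w lower) then "Identifying your location…"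
  else if ["age", " saal", "years old", "born", "umar"].any (fun w => PySem.Str.isIn w lower) then "Noting your age…"
  else if ["farmer", "kisaan", "kisan", "agriculture", "khet", "land", "zameen"].any (fun w => PySem.Str.isIn w lower) then "Noting occupation…"
  else if ["family", "parivar", "member", "wife", "husband", "children", "bache"].any (fun w => PySem.Str.isIn w lower) then "Understanding family details…"
  else if ["check", "eligib", "patrata", "yojana", "scheme", "apply"].any (fun w => PySem.Str.isIn w lower) then "Running eligibility check…"
  else "Understanding your message…"

-- ===== PORT B =====
-- Source B's _CATEGORY_KEYWORDS, _TEXTS, _FLAT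
def pvCats : List (List String) :=
  [["lakh", "hazar", "income", "salary", "earning", "rupay", "paisa", "kamata", "kamate"],
   [" sc", " st", " obc", "dalit", "adivasi", "caste", "jati", "category", "varg"],
   ["bpl", "ration", "aadhaar", "aadhar", "document", "card"],
   ["state", "district", "village", "gaon", "city", "shahar", "pradesh", "from"],
   ["age", " saal", "years old", "born", "umar"],
   ["farmer", "kisaan", "kisan", "agriculture", "khet", "land", "zameen"],
   ["family", "parivar", "member", "wife", "husband", "children", "bache"],
   ["check", "eligib", "patrata", "yojana", "scheme", "apply"]]

def pvTexts : List String :=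
  ["Parsing income details…", "Noting community category…", "Checking document details…",
   "Identifying your location…", "Noting your age…", "Noting occupation…",
   "Understanding family details…", "Running eligibility check…", "Understanding your message…"]

def pvFlat : List (String × Nat) :=
  pvCats.zipIdx.flatMap (fun p => p.1.map (fun kw => (kw, p.2)))

-- the double loop of Source B: best category over positions i and flat keyword pairs
-- (Python's lower.startswith(kw, i) is exactly: kw is a prefix of lower[i:])
def pvBest (cs : List Char) : Nat :=
  (List.range cs.length).foldl
    (fun best i =>
      pvFlat.foldl
        (fun best p =>
          if p.2 < best && PySem.Chars.startswith (cs.drop i) p.1.toList then p.2 else best)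
        best)
    8

def get_thinking_hint_py_alt (message : String) : String :=
  let lower := PySem.Str.lower message
  pvTexts.getD (pvBest lower.toList) ""   -- pvBest ≤ 8 is always in range of the 9 texts

-- ===== PRECONDITION & SPEC =====
def Spec_get_thinking_hint_py (message : String) (out : String) : Prop := out = get_thinking_hint_py_alt message
instance (message : String) (out : String) : Decidable (Spec_get_thinking_hint_py message out) := by unfold Spec_get_thinking_hint_py; infer_instance

-- ===== CLAIM (what is proved, stated in full; the proofs are below) =====
def Claim_equal_get_thinking_hint_py : Prop := ∀ (message : String), Dom_get_thinking_hint_py message → Spec_get_thinking_hint_py message (get_thinking_hint_py message)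

-- ===== LEMMAS AND PROOFS =====

-- category c matches: some keyword of category c occurs in cs
def pvM (cs : List Char) (c : Nat) : Prop :=
  ∃ w ∈ pvCats.getD c [], PySem.Chars.isIn w.toList cs = true

-- every flat pair has category ≤ 7, its keyword in that category, and a nonempty keyword
lemma pvFlat_sound : ∀ p ∈ pvFlat, p.2 ≤ 7 ∧ p.1 ∈ pvCats.getD p.2 [] ∧ p.1.toList ≠ [] := by decide

lemma pvFlat_complete : ∀ c < 8, ∀ w ∈ pvCats.getD c [], (w, c) ∈ pvFlat := by decide

-- the inner fold: the result is b or some matched value, is ≤ b, and ≤ every matched value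
lemma pv_inner_spec {α : Type} (cond : α → Bool) (val : α → Nat) (l : List α) (b : Nat) :
    (l.foldl (fun b a => if val a < b && cond a then val a else b) b = b
      ∨ ∃ a ∈ l, cond a = true ∧ l.foldl (fun b a => if val a < b && cond a then val a else b) b = val a)
    ∧ l.foldl (fun b a => if val a < b && cond a then val a else b) b ≤ b
    ∧ ∀ a ∈ l, cond a = true → l.foldl (fun b a => if val a < b && cond a then val a else b) b ≤ val a := by
  induction l generalizing b with
  | nil => simp
  | cons a l ih =>
    simp only [List.foldl_cons]
    by_cases hc : (decide (val a < b) && cond a) = true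
    · obtain ⟨hva, hca⟩ : val a < b ∧ cond a = true := by simpa using hc
      rw [if_pos hc]
      obtain ⟨h1, h2, h3⟩ := ih (val a)
      refine ⟨?_, le_trans h2 hva.le, ?_⟩
      · rcases h1 with h1 | ⟨a', ha', hc', he'⟩
        · exact Or.inr ⟨a, List.mem_cons_self, hca, h1⟩
        · exact Or.inr ⟨a', List.mem_cons_of_mem _ ha', hc', he'⟩
      · intro a' ha' hca'
        rcases List.mem_cons.mp ha' with rfl | ha'
        · exact h2
        · exact h3 a' ha' hca'
    · rw [if_neg hc]
      obtain ⟨h1, h2, h3⟩ := ih b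
      refine ⟨?_, h2, ?_⟩
      · rcases h1 with h1 | ⟨a', ha', hc', he'⟩
        · exact Or.inl h1
        · exact Or.inr ⟨a', List.mem_cons_of_mem _ ha', hc', he'⟩
      · intro a' ha' hca'
        rcases List.mem_cons.mp ha' with rfl | ha'
        · have hv : ¬ val a' < b := fun hv => hc (by simp [hv, hca'])
          omega
        · exact h3 a' ha' hca'

-- the outer fold over positions 0..n-1
lemma pv_outer_spec {α : Type} (cond : Nat → α → Bool) (val : α → Nat) (l : List α)
    (n : Nat) (b : Nat) :
    ((List.range n).foldl (fun b i => l.foldl (fun b a => if val a < b && cond i a then val a else b) b) b = b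
      ∨ ∃ i < n, ∃ a ∈ l, cond i a = true ∧
          (List.range n).foldl (fun b i => l.foldl (fun b a => if val a < b && cond i a then val a else b) b) b = val a)
    ∧ (List.range n).foldl (fun b i => l.foldl (fun b a => if val a < b && cond i a then val a else b) b) b ≤ b
    ∧ ∀ i < n, ∀ a ∈ l, cond i a = true →
        (List.range n).foldl (fun b i => l.foldl (fun b a => if val a < b && cond i a then val a else b) b) b ≤ val a := by
  induction n with
  | zero => simp
  | succ n ih =>
    obtain ⟨h1, h2, h3⟩ := ih
    simp only [List.range_succ, List.foldl_append, List.foldl_cons, List.foldl_nil]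
    set r := (List.range n).foldl (fun b i => l.foldl (fun b a => if val a < b && cond i a then val a else b) b) b with hr
    obtain ⟨g1, g2, g3⟩ := pv_inner_spec (cond n) val l r
    refine ⟨?_, le_trans g2 h2, ?_⟩
    · rcases g1 with g1 | ⟨a, ha, hc, he⟩
      · rw [g1]
        rcases h1 with h1 | ⟨i, hi, a, ha, hc, he⟩
        · exact Or.inl h1
        · exact Or.inr ⟨i, by omega, a, ha, hc, he⟩
      · exact Or.inr ⟨n, by omega, a, ha, hc, he⟩
    · intro i hi a ha hc
      rcases Nat.lt_succ_iff_lt_or_eq.mp hi with hi | rfl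
      · exact le_trans g2 (h3 i hi a ha hc)
      · exact g3 a ha hc

-- a nonempty pattern occurs in cs iff it is a prefix at some position < length
lemma pv_pos_iff_isIn (sub cs : List Char) (h : sub ≠ []) :
    (∃ i < cs.length, PySem.Chars.startswith (cs.drop i) sub = true)
      ↔ PySem.Chars.isIn sub cs = true := by
  rw [← PySem.Chars.exists_prefix_drop_iff_isIn]
  constructor
  · rintro ⟨i, _, hs⟩
    exact ⟨i, (PySem.Chars.startswith_iff _ _).mp hs⟩
  · rintro ⟨j, hp⟩
    by_cases hj : j < cs.length
    · exact ⟨j, hj, (PySem.Chars.startswith_iff _ _).mpr hp⟩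
    · exfalso
      rw [List.drop_eq_nil_of_le (by omega)] at hp
      exact h (List.prefix_nil.mp hp)

-- the heart: pvBest returns the least matching category (8 if none matches)
lemma pvBest_eq (cs : List Char) (c : Nat)
    (hlt : ∀ c' < c, ¬ pvM cs c') (hm : c = 8 ∨ (c < 8 ∧ pvM cs c)) : pvBest cs = c := by
  unfold pvBest
  obtain ⟨h1, h2, h3⟩ :=
    pv_outer_spec (fun i (p : String × Nat) => PySem.Chars.startswith (cs.drop i) p.1.toList)
      (fun p : String × Nat => p.2) pvFlat cs.length 8
  have hub : (List.range cs.length).foldl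
      (fun b i => pvFlat.foldl
        (fun b p => if p.2 < b && PySem.Chars.startswith (cs.drop i) p.1.toList then p.2 else b) b) 8 ≤ c := by
    rcases hm with rfl | ⟨hc8, hmc⟩
    · exact h2
    · unfold pvM at hmc
      obtain ⟨w, hw, hin⟩ := hmc
      have hmem : (w, c) ∈ pvFlat := pvFlat_complete c hc8 w hw
      obtain ⟨i, hi, hs⟩ := (pv_pos_iff_isIn w.toList cs (pvFlat_sound _ hmem).2.2).mpr hin
      exact h3 i hi (w, c) hmem hs
  rcases h1 with h1 | ⟨i, hi, p, hp, hcnd, he⟩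
  · rcases hm with rfl | ⟨hc8, _⟩
    · exact h1
    · omega
  · rw [he] at hub ⊢
    obtain ⟨hp7, hpw, hpn⟩ := pvFlat_sound p hp
    have hin : PySem.Chars.isIn p.1.toList cs = true :=
      (pv_pos_iff_isIn p.1.toList cs hpn).mp ⟨i, hi, hcnd⟩
    by_contra hne
    exact hlt p.2 (by omega) (by unfold pvM; exact ⟨p.1, hpw, hin⟩)

-- A's branch conditions are exactly the pvM predicates
lemma pv_any_iff (lower : String) (c : Nat) :
    ((pvCats.getD c []).any (fun w => PySem.Str.isIn w lower) = true) ↔ pvM lower.toList c := by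
  unfold pvM
  rw [List.any_eq_true]
  constructor <;> rintro ⟨w, hw, hin⟩ <;> refine ⟨w, hw, ?_⟩
  · rw [PySem.Chars.isIn_iff_infix]; exact (PySem.Str.isIn_iff_infix _ _).mp hin
  · rw [PySem.Str.isIn_iff_infix]; exact (PySem.Chars.isIn_iff_infix _ _).mp hin

-- ===== VERDICT (by name: the statement is the Claim_ definition above) =====
theorem get_thinking_hint_py_spec : Claim_equal_get_thinking_hint_py := by
  intro message _
  show get_thinking_hint_py message = get_thinking_hint_py_alt message
  have halt : get_thinking_hint_py_alt message
      = pvTexts.getD (pvBest (PySem.Str.lower message).toList) "" := rfl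
  rw [halt]
  simp only [get_thinking_hint_py]
  set lower := PySem.Str.lower message with hlow
  have H : ∀ c, ((pvCats.getD c []).any (fun w => PySem.Str.isIn w lower) = true) ↔ pvM lower.toList c :=
    fun c => pv_any_iff lower c
  split_ifs with h0 h1 h2 h3 h4 h5 h6 h7
  · rw [pvBest_eq lower.toList 0 (by omega) (Or.inr ⟨by omega, (H 0).mp h0⟩)]
    rfl
  · rw [pvBest_eq lower.toList 1
      (by intro c' hc'; interval_cases c'
          · exact fun hm => h0 ((H 0).mpr hm))
      (Or.inr ⟨by omega, (H 1).mp h1⟩)]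
    rfl
  · rw [pvBest_eq lower.toList 2
      (by intro c' hc'; interval_cases c'
          · exact fun hm => h0 ((H 0).mpr hm)
          · exact fun hm => h1 ((H 1).mpr hm))
      (Or.inr ⟨by omega, (H 2).mp h2⟩)]
    rfl
  · rw [pvBest_eq lower.toList 3
      (by intro c' hc'; interval_cases c'
          · exact fun hm => h0 ((H 0).mpr hm)
          · exact fun hm => h1 ((H 1).mpr hm)
          · exact fun hm => h2 ((H 2).mpr hm))
      (Or.inr ⟨by omega, (H 3).mp h3⟩)]
    rfl
  · rw [pvBest_eq lower.toList 4
      (by intro c' hc'; interval_cases c'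
          · exact fun hm => h0 ((H 0).mpr hm)
          · exact fun hm => h1 ((H 1).mpr hm)
          · exact fun hm => h2 ((H 2).mpr hm)
          · exact fun hm => h3 ((H 3).mpr hm))
      (Or.inr ⟨by omega, (H 4).mp h4⟩)]
    rfl
  · rw [pvBest_eq lower.toList 5
      (by intro c' hc'; interval_cases c'
          · exact fun hm => h0 ((H 0).mpr hm)
          · exact fun hm => h1 ((H 1).mpr hm)
          · exact fun hm => h2 ((H 2).mpr hm)
          · exact fun hm => h3 ((H 3).mpr hm)
          · exact fun hm => h4 ((H 4).mpr hm))
      (Or.inr ⟨by omega, (H 5).mp h5⟩)]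
    rfl
  · rw [pvBest_eq lower.toList 6
      (by intro c' hc'; interval_cases c'
          · exact fun hm => h0 ((H 0).mpr hm)
          · exact fun hm => h1 ((H 1).mpr hm)
          · exact fun hm => h2 ((H 2).mpr hm)
          · exact fun hm => h3 ((H 3).mpr hm)
          · exact fun hm => h4 ((H 4).mpr hm)
          · exact fun hm => h5 ((H 5).mpr hm))
      (Or.inr ⟨by omega, (H 6).mp h6⟩)]
    rfl
  · rw [pvBest_eq lower.toList 7
      (by intro c' hc'; interval_cases c'
          · exact fun hm => h0 ((H 0).mpr hm)
          · exact fun hm => h1 ((H 1).mpr hm)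
          · exact fun hm => h2 ((H 2).mpr hm)
          · exact fun hm => h3 ((H 3).mpr hm)
          · exact fun hm => h4 ((H 4).mpr hm)
          · exact fun hm => h5 ((H 5).mpr hm)
          · exact fun hm => h6 ((H 6).mpr hm))
      (Or.inr ⟨by omega, (H 7).mp h7⟩)]
    rfl
  · rw [pvBest_eq lower.toList 8
      (by intro c' hc'; interval_cases c'
          · exact fun hm => h0 ((H 0).mpr hm)
          · exact fun hm => h1 ((H 1).mpr hm)
          · exact fun hm => h2 ((H 2).mpr hm)
          · exact fun hm => h3 ((H 3).mpr hm)
          · exact fun hm => h4 ((H 4).mpr hm)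
          · exact fun hm => h5 ((H 5).mpr hm)
          · exact fun hm => h6 ((H 6).mpr hm)
          · exact fun hm => h7 ((H 7).mpr hm))
      (Or.inl rfl)]
    rfl
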